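-- pv_equiv track=rewrite | github.com/Flameingmoy/automedal | automedal/agent/tools/cognition.py | _chunk_by_heading
-- ===== SOURCE A (Python) =====
-- def _chunk_by_heading(text: str, source: str) -> list[tuple[str, str]]:
--     """Split a markdown doc on `##`-level headings; return (heading, body) pairs.
--
--     Lines before the first `##` form a single chunk under the file's name.
--     """
--     chunks: list[tuple[str, str]] = []
--     current_head = source
--     current_body: list[str] = []
--     for line in text.splitlines():
--         if line.startswith("## "):
--             if current_body:
--                 chunks.append((current_head, "\n".join(current_body).strip()))
--             current_head = line[3:].strip() or source
--             current_body = [line]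
--         else:
--             current_body.append(line)
--     if current_body:
--         chunks.append((current_head, "\n".join(current_body).strip()))
--     return [(h, b) for h, b in chunks if b]
-- ===== SOURCE B (Python) =====
-- def _chunk_by_heading(text: str, source: str) -> list[tuple[str, str]]:
--     # Two-phase rewrite: a single bottom-up pass partitions the lines into
--     # heading-started segments plus a leading segment, then chunk construction
--     # and empty-body filtering happen separately over the segments.
--     segs: list[list[str]] = []   # heading segments, collected bottom-up
--     tail: list[str] = []         # current segment's lines, bottom-up
--     for line in reversed(text.splitlines()):
--         tail.append(line)
--         if line.startswith("## "):
--             tail.reverse()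
--             segs.append(tail)
--             tail = []
--     tail.reverse()
--     segs.reverse()
--     pairs = [(source, "\n".join(tail).strip())] + [
--         (seg[0][3:].strip() or source, "\n".join(seg).strip()) for seg in segs
--     ]
--     return [(h, b) for h, b in pairs if b]
-- ===== Notes on version B (the rewrite author's own statement) =====
-- stated objective: alternative
-- what changed: B replaces A's streaming loop with inline flushes of (head, body) state by a two-phase decomposition: one bottom-up pass partitions the lines into heading-started segments plus a leading segment, then a separate comprehension builds the (heading, body) pairs and filters out empty bodies.
import Mathlib
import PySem

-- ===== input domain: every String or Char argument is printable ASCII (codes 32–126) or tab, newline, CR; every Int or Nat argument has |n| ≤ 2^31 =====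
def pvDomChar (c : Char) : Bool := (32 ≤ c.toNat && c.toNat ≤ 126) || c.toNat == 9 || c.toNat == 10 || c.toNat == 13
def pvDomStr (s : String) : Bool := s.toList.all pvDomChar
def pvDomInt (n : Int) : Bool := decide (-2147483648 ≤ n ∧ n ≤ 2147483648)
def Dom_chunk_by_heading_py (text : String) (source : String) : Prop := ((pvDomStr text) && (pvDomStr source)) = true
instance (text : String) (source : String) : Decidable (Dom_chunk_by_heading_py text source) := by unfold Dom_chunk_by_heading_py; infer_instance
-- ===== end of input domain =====

-- B separates boundary-finding (one bottom-up partition of the lines into segments)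
-- from chunk construction and filtering, instead of A's inline flush; objective: alternative decomposition.

-- ===== PORT A =====
-- one loop iteration of A: state = (chunks, current_head, current_body)
def chunkStepA (source : String) (st : List (String × String) × String × List String)
    (line : String) : List (String × String) × String × List String :=
  let (chunks, head, body) := st
  if PySem.Str.startswith line "## " then
    let chunks := if body ≠ [] then
        chunks ++ [(head, PySem.Str.strip (PySem.Str.join "\n" body))] else chunks
    let h := PySem.Str.strip (PySem.Str.slice line (some 3) none)
    (chunks, (if h = "" then source else h), [line])
  else
    (chunks, head, body ++ [line])

-- the final flush after A's loop ("if current_body: chunks.append(...)")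
def finishA (st : List (String × String) × String × List String) : List (String × String) :=
  if st.2.2 ≠ [] then st.1 ++ [(st.2.1, PySem.Str.strip (PySem.Str.join "\n" st.2.2))] else st.1

def chunk_by_heading_py (text : String) (source : String) : List (String × String) :=
  (finishA ((PySem.Str.splitlines text).foldl (chunkStepA source) ([], source, []))).filter
    (fun p => p.2 != "")

-- ===== PORT B =====
-- one (reversed-order) partition step of B: state = (segs, tail), both collected bottom-up
def segStepB (line : String) (st : List (List String) × List String) :
    List (List String) × List String :=
  if PySem.Str.startswith line "## " then ((line :: st.2) :: st.1, [])
  else (st.1, line :: st.2)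

-- B's chunk construction for a heading segment (seg[0][3:].strip() or source, join.strip())
def mkChunkB (source : String) (seg : List String) : String × String :=
  match seg with
  | [] => (source, "")  -- unreachable: every heading segment starts with its heading line
  | l :: _ =>
    let h := PySem.Str.strip (PySem.Str.slice l (some 3) none)
    ((if h = "" then source else h), PySem.Str.strip (PySem.Str.join "\n" seg))

def chunk_by_heading_py_alt (text : String) (source : String) : List (String × String) :=
  ((source, PySem.Str.strip (PySem.Str.join "\n" ((PySem.Str.splitlines text).foldr segStepB ([], [])).2)) ::
      (((PySem.Str.splitlines text).foldr segStepB ([], [])).1).map (mkChunkB source)).filter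
    (fun p => p.2 != "")

-- ===== PRECONDITION & SPEC =====
def Spec_chunk_by_heading_py (text : String) (source : String) (out : List (String × String)) : Prop := out = chunk_by_heading_py_alt text source
instance (text : String) (source : String) (out : List (String × String)) : Decidable (Spec_chunk_by_heading_py text source out) := by unfold Spec_chunk_by_heading_py; infer_instance

-- ===== CLAIM (what is proved, stated in full; the proofs are below) =====
def Claim_equal_chunk_by_heading_py : Prop := ∀ (text : String) (source : String), Dom_chunk_by_heading_py text source → Spec_chunk_by_heading_py text source (chunk_by_heading_py text source)

-- ===== LEMMAS AND PROOFS =====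

-- the chunks A's loop (started at head/body, empty chunk list) eventually emits, incl. final flush
def pairsOf (source head : String) (body : List String) : List String → List (String × String)
  | [] => if body ≠ [] then [(head, PySem.Str.strip (PySem.Str.join "\n" body))] else []
  | l :: ls =>
    if PySem.Str.startswith l "## " then
      (if body ≠ [] then [(head, PySem.Str.strip (PySem.Str.join "\n" body))] else []) ++
        pairsOf source (let h := PySem.Str.strip (PySem.Str.slice l (some 3) none);
                        if h = "" then source else h) [l] ls
    else pairsOf source head (body ++ [l]) ls

theorem foldl_pairsOf (source : String) :
    ∀ (ls : List String) (chunks : List (String × String)) (head : String) (body : List String),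
    finishA (ls.foldl (chunkStepA source) (chunks, head, body))
      = chunks ++ pairsOf source head body ls := by
  intro ls
  induction ls with
  | nil =>
    intro chunks head body
    simp only [List.foldl, pairsOf, finishA]
    split <;> simp
  | cons l ls ih =>
    intro chunks head body
    by_cases hl : PySem.Str.startswith l "## " = true
    · simp only [List.foldl, pairsOf, chunkStepA, if_pos hl]
      rw [ih]
      split <;> simp [List.append_assoc]
    · simp only [List.foldl, pairsOf, chunkStepA, if_neg hl]
      rw [ih]

theorem pairsOf_segs (source : String) :
    ∀ (ls : List String) (head : String) (body : List String),
    pairsOf source head body ls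
      = (if body ++ (ls.foldr segStepB ([], [])).2 ≠ [] then
           [(head, PySem.Str.strip (PySem.Str.join "\n" (body ++ (ls.foldr segStepB ([], [])).2)))]
         else []) ++ ((ls.foldr segStepB ([], [])).1).map (mkChunkB source) := by
  intro ls
  induction ls with
  | nil => intro head body; simp [pairsOf]
  | cons l ls ih =>
    intro head body
    by_cases hl : PySem.Str.startswith l "## " = true
    · simp only [pairsOf, List.foldr, segStepB, if_pos hl]
      rw [ih]
      simp [mkChunkB]
    · simp only [pairsOf, List.foldr, segStepB, if_neg hl]
      rw [ih]
      simp [List.append_assoc]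

theorem strip_join_nil : PySem.Str.strip (PySem.Str.join "\n" ([] : List String)) = "" := by decide

-- ===== VERDICT (by name: the statement is the Claim_ definition above) =====
theorem chunk_by_heading_py_spec : Claim_equal_chunk_by_heading_py := by
  intro text source _
  unfold Spec_chunk_by_heading_py chunk_by_heading_py chunk_by_heading_py_alt
  rw [foldl_pairsOf, pairsOf_segs]
  
  simp only [List.nil_append]
  rcases h2 : ((PySem.Str.splitlines text).foldr segStepB ([], [])).2 with _ | ⟨a, tl⟩
  · simp [strip_join_nil]
  · simp
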